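-- pv_equiv track=rewrite | github.com/sarahmitchell-cpu/etf-trader | research/strategy_e_csi100_fair_backtest.py | get_constituents_for_date
-- ===== SOURCE A (Python) =====
-- def get_constituents_for_date(hist_data, target_date):
--     """Get the constituent list that was effective at target_date."""
--     dates = sorted(hist_data.keys())
--     # Find the most recent constituent list before or on target_date
--     effective = None
--     for dt in dates:
--         if dt <= target_date:
--             effective = dt
--         else:
--             break
--     if effective is None:
--         effective = dates[0]  # use earliest if before all data
--     return hist_data[effective]
-- ===== SOURCE B (Python) =====
-- def get_constituents_for_date(hist_data, target_date):
--     """Get the constituent list that was effective at target_date."""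
--     # Single pass: track the latest date <= target_date, no sorting needed.
--     best = None
--     for dt in hist_data:
--         if dt <= target_date and (best is None or dt > best):
--             best = dt
--     if best is None:
--         best = min(hist_data)  # target precedes all data: use earliest
--     return hist_data[best]
-- ===== Notes on version B (the rewrite author's own statement) =====
-- stated objective: alternative
-- what changed: Replaces A's sort-all-dates-then-scan-with-break by a single unsorted pass that keeps a running maximum of the dates <= target_date (falling back to min() of the dates when none qualifies).
-- outside the precondition, e.g. on get_constituents_for_date({}, '2020'): A raises IndexError, B raises ValueError
import Mathlib
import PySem

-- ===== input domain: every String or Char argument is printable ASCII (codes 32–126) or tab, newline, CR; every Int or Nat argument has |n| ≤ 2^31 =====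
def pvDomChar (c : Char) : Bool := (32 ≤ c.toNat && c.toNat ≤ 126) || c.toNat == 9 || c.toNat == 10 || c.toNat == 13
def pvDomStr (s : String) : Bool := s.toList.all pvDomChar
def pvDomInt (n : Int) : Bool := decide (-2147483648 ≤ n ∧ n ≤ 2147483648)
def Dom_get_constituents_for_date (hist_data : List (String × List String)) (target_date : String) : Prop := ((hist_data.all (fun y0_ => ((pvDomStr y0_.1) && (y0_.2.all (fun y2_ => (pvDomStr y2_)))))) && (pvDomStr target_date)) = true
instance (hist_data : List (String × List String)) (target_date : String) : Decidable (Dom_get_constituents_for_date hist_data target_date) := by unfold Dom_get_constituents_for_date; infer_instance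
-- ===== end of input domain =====

-- B replaces A's sort-then-scan-with-break by a single running-maximum pass over the
-- dict keys (objective: alternative — same result, no upfront sort).

-- ===== PORT A =====
-- the 'for dt in dates: if dt <= target: effective = dt else: break' loop
def pvAScan (target_date : String) (dates : List String) (eff : Option String) : Option String :=
  match dates with
  | [] => eff
  | dt :: rest => if dt ≤ target_date then pvAScan target_date rest (some dt) else eff

def get_constituents_for_date (hist_data : List (String × List String)) (target_date : String) : List String :=
  let d := PySem.Dict.ofList hist_data
  let dates := PySem.List.sorted d.keys (fun x => x) false
  match pvAScan target_date dates none with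
  | some e => d.getD e []
  | none =>
    match dates with
    | [] => []              -- dates[0] raises IndexError here: excluded by Pre_
    | e :: _ => d.getD e []

-- ===== PORT B =====
-- 'if dt <= target_date and (best is None or dt > best): best = dt'
def pvBStep (target_date : String) (best : Option String) (dt : String) : Option String :=
  if decide (dt ≤ target_date) && best.all (fun b => decide (b < dt)) then some dt else best

def get_constituents_for_date_alt (hist_data : List (String × List String)) (target_date : String) : List String :=
  let d := PySem.Dict.ofList hist_data
  let best := d.keys.foldl (pvBStep target_date) none
  match best with
  | some b => d.getD b []
  | none =>
    match PySem.List.min? d.keys (fun x => x) with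
    | some b => d.getD b []
    | none => []            -- min({}) raises ValueError here: excluded by Pre_

-- ===== PRECONDITION & SPEC =====
-- A raises IndexError (and B ValueError) on the empty dict: excluded.
def Pre_get_constituents_for_date (hist_data : List (String × List String)) (target_date : String) : Prop := hist_data ≠ []
instance (hist_data : List (String × List String)) (target_date : String) : Decidable (Pre_get_constituents_for_date hist_data target_date) := by unfold Pre_get_constituents_for_date; infer_instance

def pvWitness_get_constituents_for_date : (List (String × List String)) × String := ([("2020-01-01", ["AAA", "BBB"])], "2021-06-30")

def Spec_get_constituents_for_date (hist_data : List (String × List String)) (target_date : String) (out : List String) : Prop := out = get_constituents_for_date_alt hist_data target_date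
instance (hist_data : List (String × List String)) (target_date : String) (out : List String) : Decidable (Spec_get_constituents_for_date hist_data target_date out) := by unfold Spec_get_constituents_for_date; infer_instance

-- ===== CLAIM (what is proved, stated in full; the proofs are below) =====
def Claim_equal_get_constituents_for_date : Prop := ∀ (hist_data : List (String × List String)) (target_date : String), Dom_get_constituents_for_date hist_data target_date → Pre_get_constituents_for_date hist_data target_date → Spec_get_constituents_for_date hist_data target_date (get_constituents_for_date hist_data target_date)

-- ===== LEMMAS AND PROOFS =====

-- keys of a dict built from a nonempty pair list are nonempty
theorem pv_mem_keys_foldl {κ ν : Type} [BEq κ] [LawfulBEq κ]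
    (l : List (κ × ν)) (d : PySem.Dict κ ν) (k : κ) (h : k ∈ d.keys) :
    k ∈ (List.foldl (fun acc p => acc.insert p.1 p.2) d l).keys := by
  induction l generalizing d with
  | nil => exact h
  | cons p rest ih =>
    exact ih _ ((PySem.Dict.mem_keys_insert _ _ _ _).mpr (Or.inr h))

theorem pv_keys_ofList_ne_nil (hist_data : List (String × List String))
    (h : hist_data ≠ []) : (PySem.Dict.ofList hist_data).keys ≠ [] := by
  match hist_data, h with
  | p :: rest, _ =>
    have hm : p.1 ∈ (PySem.Dict.ofList (p :: rest)).keys := by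
      show p.1 ∈ (List.foldl (fun acc q => acc.insert q.1 q.2) (PySem.Dict.empty.insert p.1 p.2) rest).keys
      exact pv_mem_keys_foldl rest _ _ ((PySem.Dict.mem_keys_insert _ _ _ _).mpr (Or.inl rfl))
    exact fun hnil => by simp [hnil] at hm

-- characterisation of B's running-maximum fold
theorem pvBStep_none (t dt : String) : pvBStep t none dt = if dt ≤ t then some dt else none := by
  by_cases h : dt ≤ t <;> simp [pvBStep, h]

theorem pvBStep_some (t x dt : String) :
    pvBStep t (some x) dt = if dt ≤ t ∧ x < dt then some dt else some x := by
  have hb : (decide (dt ≤ t) && Option.all (fun b => decide (b < dt)) (some x))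
      = decide (dt ≤ t ∧ x < dt) := by
    simp [Option.all_some, Bool.decide_and]
  rw [pvBStep, hb]
  by_cases h : dt ≤ t ∧ x < dt
  · rw [if_pos (by simpa using h), if_pos h]
  · rw [if_neg (by simpa using h), if_neg h]

theorem pv_bfold_none_iff (t : String) (l : List String) (b : Option String) :
    l.foldl (pvBStep t) b = none ↔ b = none ∧ ∀ y ∈ l, ¬ y ≤ t := by
  induction l generalizing b with
  | nil => simp
  | cons dt r ih =>
    simp only [List.foldl_cons]
    cases b with
    | none =>
      rw [pvBStep_none]
      by_cases h : dt ≤ t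
      · rw [if_pos h, ih]
        constructor
        · rintro ⟨h1, -⟩; exact absurd h1 (by simp)
        · rintro ⟨-, hall⟩; exact absurd h (hall dt (List.mem_cons_self ..))
      · rw [if_neg h, ih]
        constructor
        · rintro ⟨-, hall⟩
          refine ⟨rfl, fun y hy => ?_⟩
          rcases List.mem_cons.mp hy with hy | hy
          · exact hy ▸ h
          · exact hall y hy
        · rintro ⟨-, hall⟩; exact ⟨rfl, fun y hy => hall y (List.mem_cons_of_mem _ hy)⟩
    | some x =>
      rw [pvBStep_some]
      constructor
      · intro hfold
        split at hfold
        · exact absurd ((ih _).mp hfold).1 (by simp)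
        · exact absurd ((ih _).mp hfold).1 (by simp)
      · rintro ⟨hb, -⟩; exact absurd hb (by simp)

theorem pv_bfold_some (t : String) (l : List String) (b : Option String) (m : String)
    (h : l.foldl (pvBStep t) b = some m) : (m ∈ l ∧ m ≤ t) ∨ b = some m := by
  induction l generalizing b with
  | nil => exact Or.inr h
  | cons dt r ih =>
    simp only [List.foldl_cons] at h
    rcases ih _ h with ⟨hm, hle⟩ | hb
    · exact Or.inl ⟨List.mem_cons_of_mem _ hm, hle⟩
    · cases b with
      | none =>
        rw [pvBStep_none] at hb
        split at hb
        · rename_i hc; cases hb; exact Or.inl ⟨List.mem_cons_self .., hc⟩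
        · exact absurd hb (by simp)
      | some x =>
        rw [pvBStep_some] at hb
        split at hb
        · rename_i hc; cases hb; exact Or.inl ⟨List.mem_cons_self .., hc.1⟩
        · exact Or.inr hb

theorem pv_bfold_acc_le (t : String) (l : List String) (x m : String)
    (h : l.foldl (pvBStep t) (some x) = some m) : x ≤ m := by
  induction l generalizing x with
  | nil => cases h; exact le_refl _
  | cons dt r ih =>
    simp only [List.foldl_cons, pvBStep_some] at h
    split at h
    · rename_i hc; exact le_trans (le_of_lt hc.2) (ih dt h)
    · exact ih x h

theorem pv_bfold_ub (t : String) (l : List String) (b : Option String) (m : String)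
    (h : l.foldl (pvBStep t) b = some m) : ∀ y ∈ l, y ≤ t → y ≤ m := by
  induction l generalizing b with
  | nil => intro y hy; simp at hy
  | cons dt r ih =>
    intro y hy hyt
    rcases List.mem_cons.mp hy with hy | hy
    · subst hy
      simp only [List.foldl_cons] at h
      cases b with
      | none =>
        rw [pvBStep_none, if_pos hyt] at h
        exact pv_bfold_acc_le t r y m h
      | some x =>
        rw [pvBStep_some] at h
        split at h
        · exact pv_bfold_acc_le t r y m h
        · rename_i hc
          have hle : y ≤ x := le_of_not_gt (fun hgt => hc ⟨hyt, hgt⟩)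
          exact le_trans hle (pv_bfold_acc_le t r x m h)
    · exact ih _ h y hy hyt

-- B's fold is permutation-invariant (the maximum of the qualifying keys is unique)
theorem pv_bfold_perm (t : String) (l1 l2 : List String) (hp : l1.Perm l2) :
    l1.foldl (pvBStep t) none = l2.foldl (pvBStep t) none := by
  cases h1 : l1.foldl (pvBStep t) none with
  | none =>
    have := (pv_bfold_none_iff t l1 none).mp h1
    exact ((pv_bfold_none_iff t l2 none).mpr ⟨rfl, fun y hy => this.2 y (hp.mem_iff.mpr hy)⟩).symm
  | some m1 =>
    cases h2 : l2.foldl (pvBStep t) none with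
    | none =>
      have := (pv_bfold_none_iff t l2 none).mp h2
      rcases pv_bfold_some t l1 none m1 h1 with ⟨hm, hle⟩ | hb
      · exact absurd hle (this.2 m1 (hp.mem_iff.mp hm))
      · exact absurd hb (by simp)
    | some m2 =>
      rcases pv_bfold_some t l1 none m1 h1 with ⟨hm1, hle1⟩ | hb
      · rcases pv_bfold_some t l2 none m2 h2 with ⟨hm2, hle2⟩ | hb2
        · have a1 : m1 ≤ m2 := pv_bfold_ub t l2 none m2 h2 m1 (hp.mem_iff.mp hm1) hle1
          have a2 : m2 ≤ m1 := pv_bfold_ub t l1 none m1 h1 m2 (hp.mem_iff.mpr hm2) hle2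
          exact congrArg some (le_antisymm a1 a2)
        · exact absurd hb2 (by simp)
      · exact absurd hb (by simp)

-- on a tail all of whose elements exceed t, B's fold is the identity
theorem pv_bfold_id (t : String) (l : List String) (b : Option String)
    (h : ∀ y ∈ l, ¬ y ≤ t) : l.foldl (pvBStep t) b = b := by
  induction l generalizing b with
  | nil => rfl
  | cons dt r ih =>
    have hdt : ¬ dt ≤ t := h dt (List.mem_cons_self ..)
    have hstep : pvBStep t b dt = b := by
      cases b with
      | none => rw [pvBStep_none, if_neg hdt]
      | some x => rw [pvBStep_some, if_neg (fun hc => hdt hc.1)]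
    simp only [List.foldl_cons, hstep]
    exact ih b (fun y hy => h y (List.mem_cons_of_mem _ hy))

-- on a sorted list A's break-scan equals B's running-maximum fold
theorem pv_ascan_eq_bfold (t : String) (l : List String)
    (hs : l.Pairwise (· ≤ ·)) (b : Option String)
    (hinv : ∀ x, b = some x → ∀ y ∈ l, x ≤ y) :
    pvAScan t l b = l.foldl (pvBStep t) b := by
  induction l generalizing b with
  | nil => rfl
  | cons dt r ih =>
    rcases List.pairwise_cons.mp hs with ⟨hdt, hr⟩
    by_cases hle : dt ≤ t
    · have hstepA : pvAScan t (dt :: r) b = pvAScan t r (some dt) := by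
        simp [pvAScan, hle]
      have hinv' : ∀ x, (some dt : Option String) = some x → ∀ y ∈ r, x ≤ y := by
        rintro x hx y hy; cases hx; exact hdt y hy
      rw [hstepA, ih hr (some dt) hinv']
      simp only [List.foldl_cons]
      cases b with
      | none => rw [pvBStep_none, if_pos hle]
      | some x =>
        rw [pvBStep_some]
        by_cases hlt : x < dt
        · rw [if_pos ⟨hle, hlt⟩]
        · have hxle : x ≤ dt := hinv x rfl dt (List.mem_cons_self ..)
          have hxd : x = dt := le_antisymm hxle (le_of_not_gt hlt)
          rw [if_neg (fun hc => hlt hc.2), hxd]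
    · have hrgt : ∀ y ∈ r, ¬ y ≤ t := fun y hy hyt => hle (le_trans (hdt y hy) hyt)
      have hstep : pvBStep t b dt = b := by
        cases b with
        | none => rw [pvBStep_none, if_neg hle]
        | some x => rw [pvBStep_some, if_neg (fun hc => hle hc.1)]
      simp only [pvAScan, if_neg hle, List.foldl_cons, hstep]
      exact (pv_bfold_id t r b hrgt).symm

theorem pv_core (d : PySem.Dict String (List String)) (t : String) (hk : d.keys ≠ []) :
    (match pvAScan t (PySem.List.sorted d.keys (fun x => x) false) none with
     | some e => d.getD e []
     | none => match PySem.List.sorted d.keys (fun x => x) false with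
       | [] => ([] : List String)
       | e :: _ => d.getD e []) =
    (match d.keys.foldl (pvBStep t) none with
     | some b => d.getD b []
     | none => match PySem.List.min? d.keys (fun x => x) with
       | some b => d.getD b []
       | none => []) := by
  have hperm := PySem.List.sorted_perm d.keys (fun x => x) false
  have hpair := PySem.List.sorted_pairwise d.keys (fun x => x)
  have hmain : pvAScan t (PySem.List.sorted d.keys (fun x => x) false) none
      = d.keys.foldl (pvBStep t) none := by
    rw [pv_ascan_eq_bfold t _ hpair none (by simp)]
    exact pv_bfold_perm t _ _ hperm
  rw [hmain]
  cases hres : d.keys.foldl (pvBStep t) none with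
  | some e => rfl
  | none =>
    cases hs : PySem.List.sorted d.keys (fun x => x) false with
    | nil => exact absurd (List.Perm.eq_nil (hs ▸ hperm).symm).symm (Ne.symm hk)
    | cons e tail =>
      cases hmin : PySem.List.min? d.keys (fun x => x) with
      | none => exact absurd ((PySem.List.min?_eq_none_iff d.keys _).mp hmin) hk
      | some m =>
        have h1 : e ≤ m :=
          PySem.List.key_head_sorted_le d.keys (fun x => x) hs m (PySem.List.min?_mem hmin)
        have h2 : m ≤ e := by
          have he : e ∈ d.keys := hperm.mem_iff.mp (hs ▸ List.mem_cons_self ..)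
          exact PySem.List.min?_isMin hmin e he
        rw [le_antisymm h2 h1]

-- ===== VERDICT (by name: the statement is the Claim_ definition above) =====
theorem get_constituents_for_date_spec : Claim_equal_get_constituents_for_date := by
  intro hist_data target_date _ hpre
  exact pv_core (PySem.Dict.ofList hist_data) target_date
    (pv_keys_ofList_ne_nil hist_data hpre)
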